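-- pv_equiv track=rewrite | github.com/scikit-learn/scikit-learn | scikit-learn/lib/python3.10/site-packages/fontTools/ufoLib/validators.py | fontInfoWOFFMetadataCreditsValidator
-- ===== SOURCE A (Python) =====
-- from collections.abc import Mapping, Sequence
-- from typing import Any, Type, Optional, Union
--
-- GenericDict = dict[str, tuple[Union[type, tuple[Type[Any], ...]], bool]]
--
-- def genericDictValidator(value: Any, prototype: GenericDict) -> bool:
--     """
--     Generic. (Added at version 3.)
--     """
--     # not a dict
--     if not isinstance(value, Mapping):
--         return False
--     # missing required keys
--     for key, (typ, required) in prototype.items():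
--         if not required:
--             continue
--         if key not in value:
--             return False
--     # unknown keys
--     for key in value.keys():
--         if key not in prototype:
--             return False
--     # incorrect types
--     for key, v in value.items():
--         prototypeType, required = prototype[key]
--         if v is None and not required:
--             continue
--         if not isinstance(v, prototypeType):
--             return False
--     return True
--
-- def fontInfoWOFFMetadataCreditsValidator(value: Any) -> bool:
--     """
--     Version 3+.
--     """
--     dictPrototype: GenericDict = dict(credits=(list, True))
--     if not genericDictValidator(value, dictPrototype):
--         return False
--     if not len(value["credits"]):
--         return False
--     dictPrototype = {
--         "name": (str, True),
--         "url": (str, False),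
--         "role": (str, False),
--         "dir": (str, False),
--         "class": (str, False),
--     }
--     for credit in value["credits"]:
--         if not genericDictValidator(credit, dictPrototype):
--             return False
--         if "dir" in credit and credit.get("dir") not in ("ltr", "rtl"):
--             return False
--     return True
-- ===== SOURCE B (Python) =====
-- from collections.abc import Mapping
--
-- _MISSING = object()
--
--
-- def _creditOk(credit):
--     # one pass: accumulate whether "name" was seen and the first "dir" value,
--     # rejecting unknown keys and non-str values on the fly
--     if not isinstance(credit, Mapping):
--         return False
--     has_name = False
--     dir_val = _MISSING
--     for k, v in credit.items():
--         if k == "name":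
--             has_name = True
--         elif k not in ("url", "role", "dir", "class"):
--             return False
--         if not (v is None and k != "name") and not isinstance(v, str):
--             return False
--         if k == "dir" and dir_val is _MISSING:
--             dir_val = v
--     return has_name and (dir_val is _MISSING or dir_val in ("ltr", "rtl"))
--
--
-- def fontInfoWOFFMetadataCreditsValidator(value):
--     """
--     Version 3+.
--     """
--     if not isinstance(value, Mapping):
--         return False
--     if "credits" not in value or any(k != "credits" for k in value):
--         return False
--     credits = value["credits"]
--     if not isinstance(credits, list) or not credits:
--         return False
--     return all(_creditOk(c) for c in credits)
-- ===== Notes on version B (the rewrite author's own statement) =====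
-- stated objective: simpler
-- what changed: Replaced the generic three-loop prototype-table helper with a single-pass state machine per credit that accumulates whether 'name' was seen and the first 'dir' value while rejecting unknown keys and bad values on the fly, plus a direct all-keys-equal-'credits' scan for the outer dict.
import Mathlib
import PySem

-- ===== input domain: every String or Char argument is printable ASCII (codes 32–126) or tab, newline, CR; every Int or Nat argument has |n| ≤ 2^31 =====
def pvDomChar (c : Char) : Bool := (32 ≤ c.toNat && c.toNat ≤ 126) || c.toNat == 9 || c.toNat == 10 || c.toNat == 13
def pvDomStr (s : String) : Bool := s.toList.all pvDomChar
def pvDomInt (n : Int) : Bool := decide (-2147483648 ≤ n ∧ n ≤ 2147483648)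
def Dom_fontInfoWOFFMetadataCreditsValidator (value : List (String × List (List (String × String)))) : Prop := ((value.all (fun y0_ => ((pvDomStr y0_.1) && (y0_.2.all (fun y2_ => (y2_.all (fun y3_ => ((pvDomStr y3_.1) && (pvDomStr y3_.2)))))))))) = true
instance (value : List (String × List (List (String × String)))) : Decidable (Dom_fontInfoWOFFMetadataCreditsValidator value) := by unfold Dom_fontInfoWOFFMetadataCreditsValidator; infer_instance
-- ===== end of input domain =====

-- B replaces the generic three-loop prototype helper with a single-pass state machine per
-- credit (accumulating has_name and the first "dir" value); objective: simpler, same cost.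

-- ===== PORT A =====
-- genericDictValidator on this typed domain: values are String / List, so every isinstance
-- check is vacuously true and no value is None — the third (type) loop finds nothing.
-- A prototype entry is (key, required); the type component is fixed by the input type.
def genericDictValidatorPort {α : Type} (value : List (String × α)) (prototype : List (String × Bool)) : Bool :=
  -- missing required keys
  (prototype.all (fun kr => !kr.2 || value.any (fun p => p.1 == kr.1))) &&
  -- unknown keys
  (value.all (fun p => prototype.any (fun q => q.1 == p.1))) &&
  -- incorrect types: vacuous on this domain (see comment above)
  true

def fontInfoWOFFMetadataCreditsValidator (value : List (String × List (List (String × String)))) : Bool :=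
  if !genericDictValidatorPort value [("credits", true)] then false
  else
    -- value["credits"]: first-match lookup; the key is present (just validated), so getD is unreachable
    let credits := ((value.find? (fun p => p.1 == "credits")).map Prod.snd).getD []
    if credits.length == 0 then false
    else
      credits.all (fun credit =>
        genericDictValidatorPort credit
          [("name", true), ("url", false), ("role", false), ("dir", false), ("class", false)] &&
        (!(credit.any (fun p => p.1 == "dir")) ||
          (((credit.find? (fun p => p.1 == "dir")).map Prod.snd) == some "ltr" ||
           ((credit.find? (fun p => p.1 == "dir")).map Prod.snd) == some "rtl")))

-- ===== PORT B =====
-- _creditOk's loop: hasName and the first "dir" value (none = not seen yet) are the state;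
-- the isinstance(str)/None checks of Source B are vacuous on this typed domain (values are String).
def creditGo : List (String × String) → Bool → Option String → Bool
  | [], hasName, dirVal =>
      hasName && (dirVal.isNone || dirVal == some "ltr" || dirVal == some "rtl")
  | (k, v) :: rest, hasName, dirVal =>
      if k == "name" then creditGo rest true dirVal          -- k ≠ "dir" here
      else if k == "url" || k == "role" || k == "class" then creditGo rest hasName dirVal
      else if k == "dir" then
        creditGo rest hasName (if dirVal.isNone then some v else dirVal)
      else false                                             -- unknown key

def creditOk (credit : List (String × String)) : Bool := creditGo credit false none

def fontInfoWOFFMetadataCreditsValidator_alt (value : List (String × List (List (String × String)))) : Bool :=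
  -- '"credits" not in value or any(k != "credits" for k in value)'
  if !(value.any (fun p => p.1 == "credits")) || value.any (fun p => p.1 != "credits") then false
  else
    let credits := ((value.find? (fun p => p.1 == "credits")).map Prod.snd).getD []
    if credits.isEmpty then false
    else credits.all creditOk

-- ===== PRECONDITION & SPEC =====
def Spec_fontInfoWOFFMetadataCreditsValidator (value : List (String × List (List (String × String)))) (out : Bool) : Prop := out = fontInfoWOFFMetadataCreditsValidator_alt value
instance (value : List (String × List (List (String × String)))) (out : Bool) : Decidable (Spec_fontInfoWOFFMetadataCreditsValidator value out) := by unfold Spec_fontInfoWOFFMetadataCreditsValidator; infer_instance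

-- ===== CLAIM (what is proved, stated in full; the proofs are below) =====
def Claim_equal_fontInfoWOFFMetadataCreditsValidator : Prop := ∀ (value : List (String × List (List (String × String)))), Dom_fontInfoWOFFMetadataCreditsValidator value → Spec_fontInfoWOFFMetadataCreditsValidator value (fontInfoWOFFMetadataCreditsValidator value)

-- ===== LEMMAS AND PROOFS =====

-- the accumulator characterisation of B's per-credit scan
theorem creditGo_char (l : List (String × String)) (hasName : Bool) (dirVal : Option String) :
    creditGo l hasName dirVal =
      ((hasName || l.any (fun p => p.1 == "name")) &&
       l.all (fun p => p.1 == "name" || p.1 == "url" || p.1 == "role" || p.1 == "dir" || p.1 == "class") &&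
       (let d := if dirVal.isNone then (l.find? (fun p => p.1 == "dir")).map Prod.snd else dirVal
        d.isNone || d == some "ltr" || d == some "rtl")) := by
  induction l generalizing hasName dirVal with
  | nil => cases dirVal <;> simp [creditGo]
  | cons kv rest ih =>
    obtain ⟨k, v⟩ := kv
    by_cases h1 : k = "name"
    · subst h1; simp [creditGo, ih, List.find?, Bool.or_assoc]
    · by_cases h2 : k = "url" <;> [skip; by_cases h3 : k = "role"] <;>
        [subst h2; subst h3; by_cases h4 : k = "class"] <;>
        [skip; skip; subst h4; by_cases h5 : k = "dir"]
      · simp [creditGo, List.find?, ih]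
      · simp [creditGo, List.find?, ih]
      · simp [creditGo, List.find?, ih]
      · subst h5
        cases dirVal <;> simp [creditGo, List.find?, ih]
      · simp [creditGo, List.find?, h1, h2, h3, h4, h5]

theorem any_eq_find_isSome {α : Type} (p : α → Bool) (l : List α) :
    l.any p = (l.find? p).isSome := by
  induction l with
  | nil => rfl
  | cons a t ih => by_cases h : p a <;> simp [List.find?, h, ih]

theorem outer_eq (value : List (String × List (List (String × String)))) :
    genericDictValidatorPort value [("credits", true)] =
      ((value.any (fun p => p.1 == "credits")) && !(value.any (fun p => p.1 != "credits"))) := by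
  rw [Bool.eq_iff_iff]
  simp [genericDictValidatorPort]
  intro x hx
  constructor <;> (intro h a b hab; exact (h a b hab).symm)

theorem credit_eq (credit : List (String × String)) :
    (genericDictValidatorPort credit
        [("name", true), ("url", false), ("role", false), ("dir", false), ("class", false)] &&
      (!(credit.any (fun p => p.1 == "dir")) ||
        (((credit.find? (fun p => p.1 == "dir")).map Prod.snd) == some "ltr" ||
         ((credit.find? (fun p => p.1 == "dir")).map Prod.snd) == some "rtl"))) =
    creditOk credit := by
  rw [creditOk, creditGo_char, Bool.eq_iff_iff, any_eq_find_isSome]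
  cases hf : credit.find? (fun p => p.1 == "dir") <;>
    · simp [genericDictValidatorPort]
      intros
      constructor
      · intro h a b hab
        rcases h a b hab with h | h | h | h | h <;> subst h <;> simp
      · intro h a b hab
        rcases h a b hab with (((h | h) | h) | h) | h <;> subst h <;> simp

theorem len_eq_zero_eq_isEmpty (l : List (List (String × String))) : (l.length == 0) = l.isEmpty := by
  cases l <;> rfl

-- ===== VERDICT (by name: the statement is the Claim_ definition above) =====
theorem fontInfoWOFFMetadataCreditsValidator_spec : Claim_equal_fontInfoWOFFMetadataCreditsValidator := by
  intro value _
  unfold Spec_fontInfoWOFFMetadataCreditsValidator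
  simp only [fontInfoWOFFMetadataCreditsValidator, fontInfoWOFFMetadataCreditsValidator_alt,
    outer_eq, credit_eq, len_eq_zero_eq_isEmpty, Bool.not_and, Bool.not_not]
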